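-- pv_equiv track=rewrite | github.com/sgdavies/aoc2019 | python/day14.py | get_more_order
-- ===== SOURCE A (Python) =====
-- def get_more_order(a_list, source_dict):
--     new_lists = []
--     ingredient = a_list[-1]
--     _, components = source_dict[ingredient]
--
--     for component in [component for _,component in components]:
--         new_list = list(a_list) + [component]
--         if component=="ORE":
--             new_lists.append(new_list)
--         else:
--             new_lists += get_more_order(new_list, source_dict)
--
--     return new_lists
-- ===== SOURCE B (Python) =====
-- def get_more_order(a_list, source_dict):
--     # Iterative depth-first worklist instead of recursion; each work item carries the
--     # partial path and whether it still needs expanding; children are pushed in reverse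
--     # so completed paths are emitted in the same pre-order as the recursive version.
--     completed = []
--     stack = [(list(a_list), True)]
--     while stack:
--         path, expand = stack.pop()
--         if not expand:
--             completed.append(path)
--         else:
--             _, components = source_dict[path[-1]]
--             for _, component in reversed(components):
--                 stack.append((path + [component], component != "ORE"))
--     return completed
-- ===== Notes on version B (the rewrite author's own statement) =====
-- stated objective: alternative
-- what changed: Replaces the recursion with an explicit DFS worklist of (partial path, needs-expansion) items, pushed in reverse so completed paths are emitted in the recursive pre-order, accumulating completed paths instead of concatenating recursive results.
import Mathlib
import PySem

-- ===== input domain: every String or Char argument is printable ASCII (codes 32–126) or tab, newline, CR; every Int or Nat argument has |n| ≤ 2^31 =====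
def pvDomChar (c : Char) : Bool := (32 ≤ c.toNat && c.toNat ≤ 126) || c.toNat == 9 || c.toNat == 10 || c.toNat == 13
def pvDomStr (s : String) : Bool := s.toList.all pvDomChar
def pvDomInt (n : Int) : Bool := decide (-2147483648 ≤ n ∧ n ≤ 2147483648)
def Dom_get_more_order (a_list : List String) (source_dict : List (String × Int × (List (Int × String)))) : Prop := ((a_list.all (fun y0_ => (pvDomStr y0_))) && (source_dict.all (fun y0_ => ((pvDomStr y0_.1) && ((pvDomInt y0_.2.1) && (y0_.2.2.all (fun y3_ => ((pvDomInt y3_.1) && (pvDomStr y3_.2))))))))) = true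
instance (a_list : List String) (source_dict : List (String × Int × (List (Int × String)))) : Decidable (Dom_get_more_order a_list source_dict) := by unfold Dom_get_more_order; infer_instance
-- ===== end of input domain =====

-- B replaces A's recursion with an explicit DFS worklist of (partial path, needs-expansion)
-- items that emits completed paths in the same pre-order; equivalence is proved on Pre_ below.

-- ===== PORT A =====
-- a_list[-1]; the IndexError on an empty list is excluded by Pre_ (default "" never looked up inside Pre_).
def pvLastStr (l : List String) : String := (l.getLast?).getD ""

-- dict lookup (KeyError = none, excluded by Pre_); Dict.ofList gives Python's
-- duplicate-key semantics (later pairs overwrite earlier values).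
def pvLookup (src : List (String × Int × (List (Int × String)))) (k : String) : Option (Int × (List (Int × String))) :=
  (PySem.Dict.ofList src).get? k

-- literal transliteration of A's recursion; the Nat fuel only makes it total (Pre_ inputs never exhaust it).
def goA (src : List (String × Int × (List (Int × String)))) : Nat → List String → List (List String)
  | 0, _ => []
  | f+1, a_list =>
    match pvLookup src (pvLastStr a_list) with
    | none => []          -- KeyError in Python, outside Pre_
    | some (_, components) =>
      components.foldl (fun new_lists p =>
        let new_list := a_list ++ [p.2]
        if p.2 == "ORE" then new_lists ++ [new_list]
        else new_lists ++ goA src f (a_list ++ [p.2])) []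

def get_more_order (a_list : List String) (source_dict : List (String × Int × (List (Int × String)))) : List (List String) :=
  goA source_dict (source_dict.length + 1) a_list

-- ===== PORT B =====
-- 'for _, component in reversed(components): stack.append((path + [component], component != "ORE"))'
-- (Python's stack top is the list END; here the top is the HEAD, so append becomes cons).
def pushChildren (path : List String) (comps : List (Int × String)) (stack : List (List String × Bool)) : List (List String × Bool) :=
  comps.reverse.foldl (fun st p => (path ++ [p.2], p.2 != "ORE") :: st) stack

-- the while loop of Source B; the Nat fuel only makes it total (Pre_ inputs never exhaust it).
def loopB (src : List (String × Int × (List (Int × String)))) : Nat → List (List String × Bool) → List (List String) → List (List String)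
  | 0, _, completed => completed
  | _+1, [], completed => completed
  | f+1, (path, expand) :: rest, completed =>
    if !expand then
      loopB src f rest (completed ++ [path])
    else
      match pvLookup src (pvLastStr path) with
      | none => completed   -- KeyError in Python, outside Pre_
      | some (_, comps) => loopB src f (pushChildren path comps rest) completed

def pvMaxBranch (src : List (String × Int × (List (Int × String)))) : Nat :=
  src.foldl (fun m e => max m e.2.2.length) 0

def pvFuelB (src : List (String × Int × (List (Int × String)))) : Nat :=
  (pvMaxBranch src + 1) ^ (src.length + 1)

def get_more_order_alt (a_list : List String) (source_dict : List (String × Int × (List (Int × String)))) : List (List String) :=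
  loopB source_dict (pvFuelB source_dict) [(a_list, true)] []

-- ===== PRECONDITION & SPEC =====
-- OkN src d k: the reaction graph below key k is defined (every reachable lookup succeeds)
-- and grounds out in "ORE" within depth d — exactly the inputs where A's recursion returns.
def OkN (src : List (String × Int × (List (Int × String)))) : Nat → String → Bool
  | 0, _ => false
  | d+1, k =>
    match pvLookup src k with
    | none => false
    | some (_, comps) => comps.all (fun p => p.2 == "ORE" || OkN src d p.2)

-- Pre_ excludes exactly the inputs where A raises: empty a_list (IndexError), a missing
-- key reachable from the last ingredient (KeyError), or a cyclic table (RecursionError).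
def Pre_get_more_order (a_list : List String) (source_dict : List (String × Int × (List (Int × String)))) : Prop :=
  a_list ≠ [] ∧ OkN source_dict (source_dict.length + 1) (pvLastStr a_list) = true

instance (a_list : List String) (source_dict : List (String × Int × (List (Int × String)))) : Decidable (Pre_get_more_order a_list source_dict) := by unfold Pre_get_more_order; infer_instance

def pvWitness_get_more_order : List String × (List (String × Int × (List (Int × String)))) :=
  (["FUEL"], [("FUEL", 1, [(7, "A"), (1, "ORE")]), ("A", 10, [(10, "ORE")])])

def Spec_get_more_order (a_list : List String) (source_dict : List (String × Int × (List (Int × String)))) (out : List (List String)) : Prop := out = get_more_order_alt a_list source_dict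
instance (a_list : List String) (source_dict : List (String × Int × (List (Int × String)))) (out : List (List String)) : Decidable (Spec_get_more_order a_list source_dict out) := by unfold Spec_get_more_order; infer_instance

-- ===== CLAIM (what is proved, stated in full; the proofs are below) =====
def Claim_equal_get_more_order : Prop := ∀ (a_list : List String) (source_dict : List (String × Int × (List (Int × String)))), Dom_get_more_order a_list source_dict → Pre_get_more_order a_list source_dict → Spec_get_more_order a_list source_dict (get_more_order a_list source_dict)

-- ===== LEMMAS AND PROOFS =====

lemma pvLastStr_snoc (l : List String) (x : String) : pvLastStr (l ++ [x]) = x := by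
  simp [pvLastStr]

lemma pushChildren_eq (path : List String) (comps : List (Int × String)) (stack : List (List String × Bool)) :
    pushChildren path comps stack = comps.map (fun p => (path ++ [p.2], p.2 != "ORE")) ++ stack := by
  induction comps generalizing stack with
  | nil => simp [pushChildren]
  | cons h t ih =>
      simp only [pushChildren, List.reverse_cons, List.foldl_append, List.foldl_cons, List.foldl_nil] at *
      simp [ih]

lemma loopB_nil (src : List (String × Int × (List (Int × String)))) (fuel : Nat) (completed : List (List String)) :
    loopB src fuel [] completed = completed := by
  cases fuel <;> simp [loopB]

lemma foldl_max_init (src : List (String × Int × (List (Int × String)))) :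
    ∀ (m : Nat), m ≤ src.foldl (fun m e => max m e.2.2.length) m := by
  induction src with
  | nil => simp
  | cons a t ih => intro m; exact le_trans (le_max_left _ _) (ih _)

lemma branch_le_aux (e : String × Int × (List (Int × String))) :
    ∀ (src : List (String × Int × (List (Int × String)))) (m : Nat), e ∈ src →
      e.2.2.length ≤ src.foldl (fun m e => max m e.2.2.length) m := by
  intro src
  induction src with
  | nil => intro m h; cases h
  | cons a t ih =>
      intro m h
      rcases List.mem_cons.mp h with h | h
      · subst h; exact le_trans (le_max_right _ _) (foldl_max_init t _)
      · exact ih _ h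

lemma values_foldl_insert_sub (l : List (String × Int × (List (Int × String)))) :
    ∀ (d : PySem.Dict String (Int × (List (Int × String)))) (w),
      w ∈ (l.foldl (fun d p => d.insert p.1 p.2) d).values → w ∈ d.values ∨ ∃ e ∈ l, e.2 = w := by
  induction l with
  | nil => intro d w h; exact Or.inl h
  | cons a t ih =>
      intro d w h
      simp only [List.foldl_cons] at h
      rcases ih _ _ h with h | ⟨e, he, hv⟩
      · rcases PySem.Dict.mem_values_insert _ _ _ _ h with h | h
        · exact Or.inr ⟨a, List.mem_cons_self, h.symm⟩
        · exact Or.inl h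
      · exact Or.inr ⟨e, List.mem_cons_of_mem _ he, hv⟩

lemma branch_le (src : List (String × Int × (List (Int × String)))) (k : String) (v : Int × (List (Int × String)))
    (h : pvLookup src k = some v) : v.2.length ≤ pvMaxBranch src := by
  unfold pvLookup at h
  have hmemItems := PySem.Dict.mem_items_of_get?_eq_some _ h
  have hval : v ∈ (PySem.Dict.ofList src).values := by
    simp only [PySem.Dict.values]
    exact List.mem_map.mpr ⟨(k, v), hmemItems, rfl⟩
  have hofl : PySem.Dict.ofList src = src.foldl (fun d p => d.insert p.1 p.2) PySem.Dict.empty := by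
    rfl
  rw [hofl] at hval
  rcases values_foldl_insert_sub src _ _ hval with h0 | ⟨e, he, hv⟩
  · simp [PySem.Dict.empty, PySem.Dict.values] at h0
  · have := branch_le_aux e src 0 he
    rw [hv] at this
    exact this

-- A's loop body rewritten as an extend-by-a-function fold, so it becomes a flatMap.
lemma goA_succ (src : List (String × Int × (List (Int × String)))) (f : Nat) (a_list : List String)
    (c : Int) (comps : List (Int × String)) (h : pvLookup src (pvLastStr a_list) = some (c, comps)) :
    goA src (f+1) a_list
      = comps.flatMap (fun p => if p.2 == "ORE" then [a_list ++ [p.2]] else goA src f (a_list ++ [p.2])) := by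
  simp only [goA, h]
  have hfun : (fun (acc : List (List String)) (p : Int × String) =>
      if p.2 == "ORE" then acc ++ [a_list ++ [p.2]] else acc ++ goA src f (a_list ++ [p.2]))
      = (fun acc p => acc ++ (if p.2 == "ORE" then [a_list ++ [p.2]] else goA src f (a_list ++ [p.2]))) := by
    funext acc p; split <;> rfl
  rw [hfun, PySem.List.foldl_append_eq_flatMap]
  simp

-- Main invariant: processing one Pre_-good expansion item consumes a fixed number
-- k ≤ (W+1)^d of loop steps and appends exactly A's recursive output for that path.
lemma loopB_run (src : List (String × Int × (List (Int × String)))) :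
    ∀ d path, OkN src d (pvLastStr path) = true →
      ∃ k, k ≤ (pvMaxBranch src + 1) ^ d ∧
        ∀ rest acc fuel, loopB src (fuel + k) ((path, true) :: rest) acc = loopB src fuel rest (acc ++ goA src d path) := by
  intro d
  induction d with
  | zero => intro path hok; simp [OkN] at hok
  | succ d ih =>
      intro path hok
      simp only [OkN] at hok
      rcases hlk : pvLookup src (pvLastStr path) with _ | ⟨c, comps⟩
      · rw [hlk] at hok; simp at hok
      · rw [hlk] at hok
        simp only [List.all_eq_true] at hok
        -- inner induction over the children list
        have inner : ∀ cs : List (Int × String), (∀ p ∈ cs, (p.2 == "ORE" || OkN src d p.2) = true) →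
            ∃ k, k ≤ cs.length * (pvMaxBranch src + 1) ^ d ∧
              ∀ rest acc fuel,
                loopB src (fuel + k) (cs.map (fun p => (path ++ [p.2], p.2 != "ORE")) ++ rest) acc
                  = loopB src fuel rest (acc ++ cs.flatMap (fun p => if p.2 == "ORE" then [path ++ [p.2]] else goA src d (path ++ [p.2]))) := by
          intro cs hcs
          induction cs with
          | nil => exact ⟨0, by simp, by intro rest acc fuel; simp⟩
          | cons p cs' ihc =>
              have hp := hcs p (List.mem_cons_self)
              rcases ihc (fun q hq => hcs q (List.mem_cons_of_mem _ hq)) with ⟨k', hk', hstep'⟩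
              by_cases hore : p.2 = "ORE"
              · refine ⟨k' + 1, ?_, ?_⟩
                · have h1 : 1 ≤ (pvMaxBranch src + 1) ^ d := Nat.one_le_pow _ _ (Nat.succ_pos _)
                  calc k' + 1 ≤ cs'.length * (pvMaxBranch src + 1) ^ d + (pvMaxBranch src + 1) ^ d :=
                        Nat.add_le_add hk' h1
                    _ = (p :: cs').length * (pvMaxBranch src + 1) ^ d := by
                        simp [List.length_cons, Nat.succ_mul]
                · intro rest acc fuel
                  have : fuel + (k' + 1) = (fuel + k') + 1 := by omega
                  rw [this]
                  simp only [List.map_cons, List.cons_append, hore, loopB]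
                  simp only [bne_self_eq_false, Bool.not_false, if_true]
                  rw [hstep' rest (acc ++ [path ++ ["ORE"]]) fuel]
                  simp [hore]
              · have hokp : OkN src d p.2 = true := by
                  rcases Bool.or_eq_true_iff.mp hp with h | h
                  · exact absurd (by simpa using h) hore
                  · exact h
                have hokp' : OkN src d (pvLastStr (path ++ [p.2])) = true := by
                  rw [pvLastStr_snoc]; exact hokp
                rcases ih (path ++ [p.2]) hokp' with ⟨kc, hkc, hstepc⟩
                refine ⟨kc + k', ?_, ?_⟩
                · calc kc + k' ≤ (pvMaxBranch src + 1) ^ d + cs'.length * (pvMaxBranch src + 1) ^ d :=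
                      Nat.add_le_add hkc hk'
                    _ = (p :: cs').length * (pvMaxBranch src + 1) ^ d := by
                        simp [List.length_cons, Nat.succ_mul, Nat.add_comm]
                · intro rest acc fuel
                  have : fuel + (kc + k') = (fuel + k') + kc := by omega
                  rw [this]
                  simp only [List.map_cons, List.cons_append]
                  have hbne : (p.2 != "ORE") = true := by simp [hore]
                  rw [hbne]
                  rw [hstepc (cs'.map (fun p => (path ++ [p.2], p.2 != "ORE")) ++ rest) acc (fuel + k')]
                  rw [hstep' rest (acc ++ goA src d (path ++ [p.2])) fuel]
                  simp [hore, List.append_assoc]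
        rcases inner comps hok with ⟨kI, hkI, hstepI⟩
        refine ⟨kI + 1, ?_, ?_⟩
        · have hW : comps.length ≤ pvMaxBranch src := branch_le src _ (c, comps) hlk
          have h1 : 1 ≤ (pvMaxBranch src + 1) ^ d := Nat.one_le_pow _ _ (Nat.succ_pos _)
          have : kI ≤ pvMaxBranch src * (pvMaxBranch src + 1) ^ d :=
            le_trans hkI (Nat.mul_le_mul_right _ hW)
          calc kI + 1 ≤ pvMaxBranch src * (pvMaxBranch src + 1) ^ d + (pvMaxBranch src + 1) ^ d :=
                Nat.add_le_add this h1
            _ = (pvMaxBranch src + 1) ^ (d + 1) := by ring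
        · intro rest acc fuel
          have : fuel + (kI + 1) = (fuel + kI) + 1 := by omega
          rw [this]
          simp only [loopB, Bool.not_true, Bool.false_eq_true, if_false, hlk]
          rw [pushChildren_eq]
          rw [hstepI rest acc fuel]
          rw [goA_succ src d path c comps hlk]

-- ===== VERDICT (by name: the statement is the Claim_ definition above) =====
theorem get_more_order_spec : Claim_equal_get_more_order := by
  intro a_list src _hdom hpre
  rcases hpre with ⟨_, hok⟩
  rcases loopB_run src (src.length + 1) a_list hok with ⟨k, hk, hstep⟩
  unfold Spec_get_more_order get_more_order get_more_order_alt
  have hfuel : pvFuelB src = (pvFuelB src - k) + k := by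
    unfold pvFuelB; omega
  rw [hfuel, hstep [] [] (pvFuelB src - k), loopB_nil]
  simp
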